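-- pv_equiv track=rewrite | github.com/patelyash96/Assignments | TeamLab_coding_test/yash_patel_teamlab_coding_test.py | generate_spiral_alphabet
-- ===== SOURCE A (Python) =====
-- def generate_spiral_alphabet(size):
--     alphabet = 'ABCDEFGHIJKLMNOPQRSTUVWXYZ'
--     spiral = [['' for _ in range(size)] for _ in range(size)]
--
--     # Define the boundaries of the spiral
--     top = 0
--     bottom = size - 1
--     left = 0
--     right = size - 1
--
--     direction = 0  # 0: moving right, 1: moving down, 2: moving left, 3: moving up
--     letter_index = 0  # Current index of the alphabet
--
--     while top <= bottom and left <= right: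
--         if direction == 0:  # Moving right
--             for i in range(left, right + 1):
--                 spiral[top][i] = alphabet[letter_index]
--                 letter_index = (letter_index + 1) % 26
--             top += 1
--         elif direction == 1:  # Moving down
--             for i in range(top, bottom + 1):
--                 spiral[i][right] = alphabet[letter_index]
--                 letter_index = (letter_index + 1) % 26
--             right -= 1
--         elif direction == 2:  # Moving left
--             for i in range(right, left - 1, -1):
--                 spiral[bottom][i] = alphabet[letter_index]
--                 letter_index = (letter_index + 1) % 26
--             bottom -= 1
--         elif direction == 3:  # Moving up
--             for i in range(bottom, top - 1, -1):
--                 spiral[i][left] = alphabet[letter_index]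
--                 letter_index = (letter_index + 1) % 26
--             left += 1
--
--         direction = (direction + 1) % 4
--
--     diagonal_letters = [spiral[i][i] for i in range(size)]  # Extract the diagonal letters
--     return ''.join(diagonal_letters)
-- ===== SOURCE B (Python) =====
-- def generate_spiral_alphabet(size):
--     # O(n): walk the rings; each ring of side m contributes its first cell (main-diagonal
--     # top-left corner) and, when m > 1, the cell 2*m-2 steps later (bottom-right corner).
--     alphabet = 'ABCDEFGHIJKLMNOPQRSTUVWXYZ'
--     front = []  # diagonal letters from the top-left corners, outermost ring first
--     back = []   # diagonal letters from the bottom-right corners, outermost ring first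
--     pos = 0     # number of cells filled before the current ring starts
--     m = size    # side length of the current ring
--     while m >= 1:
--         front.append(alphabet[pos % 26])
--         if m > 1:
--             back.append(alphabet[(pos + 2 * m - 2) % 26])
--         pos += 4 * m - 4
--         m -= 2
--     return ''.join(front) + ''.join(reversed(back))
-- ===== Notes on version B (the rewrite author's own statement) =====
-- stated objective: faster
-- what changed: B drops the n-by-n grid entirely: it walks the rings once, computing the two diagonal letters each ring contributes (its first cell and the cell 2m-2 steps later) from a running cell counter, instead of filling the whole spiral and reading the diagonal back.
import Mathlib
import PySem

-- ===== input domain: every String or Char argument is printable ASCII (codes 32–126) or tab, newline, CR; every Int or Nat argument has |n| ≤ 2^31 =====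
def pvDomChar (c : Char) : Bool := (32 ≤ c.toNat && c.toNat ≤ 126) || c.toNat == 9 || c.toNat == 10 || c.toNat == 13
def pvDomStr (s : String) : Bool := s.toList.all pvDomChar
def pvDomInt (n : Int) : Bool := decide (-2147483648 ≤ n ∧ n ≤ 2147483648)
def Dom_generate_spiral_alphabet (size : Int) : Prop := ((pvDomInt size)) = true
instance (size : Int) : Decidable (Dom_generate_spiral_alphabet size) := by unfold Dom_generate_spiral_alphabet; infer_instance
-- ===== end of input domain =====

-- B replaces A's O(n^2) grid fill with an O(n) walk over the rings, emitting the two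
-- diagonal letters each ring contributes; proved to return the same string for every size.

-- ===== PORT A =====

def pvAlphA : List Char :=
  ['A','B','C','D','E','F','G','H','I','J','K','L','M','N','O','P','Q','R','S','T','U','V','W','X','Y','Z']

-- alphabet[letter_index]; letter_index always stays in [0, 26), where Python indexing is exact
def pvLetterA (li : Int) : String :=
  match PySem.List.pyGet? pvAlphA li with
  | some c => String.ofList [c]
  | none => ""

-- spiral[r][c] = v; r and c are loop counters in [0, size), where Python list assignment is exact
def pvSetCell (g : List (List String)) (r c : Int) (v : String) : List (List String) :=
  g.set r.toNat ((g.getD r.toNat []).set c.toNat v)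

-- the while loop of A: state = (top, bottom, left, right, direction, letter_index, spiral)
def pvSpin (top bottom left right direction letter_index : Int)
    (spiral : List (List String)) : List (List String) :=
  if h : top ≤ bottom ∧ left ≤ right then
    if direction = 0 then       -- moving right
      let s := (PySem.List.pyRange left (right + 1) 1).foldl
        (fun s i => (pvSetCell s.1 top i (pvLetterA s.2), PySem.Int.mod (s.2 + 1) 26))
        (spiral, letter_index)
      pvSpin (top + 1) bottom left right (PySem.Int.mod (direction + 1) 4) s.2 s.1
    else if direction = 1 then  -- moving down
      let s := (PySem.List.pyRange top (bottom + 1) 1).foldl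
        (fun s i => (pvSetCell s.1 i right (pvLetterA s.2), PySem.Int.mod (s.2 + 1) 26))
        (spiral, letter_index)
      pvSpin top bottom left (right - 1) (PySem.Int.mod (direction + 1) 4) s.2 s.1
    else if direction = 2 then  -- moving left
      let s := (PySem.List.pyRange right (left - 1) (-1)).foldl
        (fun s i => (pvSetCell s.1 bottom i (pvLetterA s.2), PySem.Int.mod (s.2 + 1) 26))
        (spiral, letter_index)
      pvSpin top (bottom - 1) left right (PySem.Int.mod (direction + 1) 4) s.2 s.1
    else if direction = 3 then  -- moving up
      let s := (PySem.List.pyRange bottom (top - 1) (-1)).foldl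
        (fun s i => (pvSetCell s.1 i left (pvLetterA s.2), PySem.Int.mod (s.2 + 1) 26))
        (spiral, letter_index)
      pvSpin top bottom (left + 1) right (PySem.Int.mod (direction + 1) 4) s.2 s.1
    else spiral  -- unreachable: direction always stays in {0,1,2,3}
  else spiral
termination_by ((bottom - top) + (right - left) + 2).toNat
decreasing_by all_goals omega

def generate_spiral_alphabet (size : Int) : String :=
  let spiral := List.replicate size.toNat (List.replicate size.toNat "")
  let final := pvSpin 0 (size - 1) 0 (size - 1) 0 0 spiral
  -- spiral[i][i] with i in range(size): indices are in range, where Python indexing is exact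
  PySem.Str.join "" ((PySem.List.pyRange 0 size 1).map
    (fun i => (final.getD i.toNat []).getD i.toNat ""))

-- ===== PORT B =====

def pvAlphB : List Char :=
  ['A','B','C','D','E','F','G','H','I','J','K','L','M','N','O','P','Q','R','S','T','U','V','W','X','Y','Z']

-- alphabet[idx]; idx is always a result of % 26, hence in [0, 26), where Python indexing is exact
def pvLetterB (idx : Int) : String :=
  match PySem.List.pyGet? pvAlphB idx with
  | some c => String.ofList [c]
  | none => ""

-- B's while loop: m = current ring side, pos = cells filled before this ring,
-- front/back = accumulated corner letters
def pvRings (m pos : Int) (front back : List String) : List String × List String :=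
  if 1 ≤ m then
    pvRings (m - 2) (pos + 4 * m - 4)
      (front ++ [pvLetterB (PySem.Int.mod pos 26)])
      (if 1 < m then back ++ [pvLetterB (PySem.Int.mod (pos + 2 * m - 2) 26)] else back)
  else (front, back)
termination_by m.toNat
decreasing_by omega

def generate_spiral_alphabet_alt (size : Int) : String :=
  let fb := pvRings size 0 [] []
  PySem.Str.join "" fb.1 ++ PySem.Str.join "" fb.2.reverse

-- ===== PRECONDITION & SPEC =====
def Spec_generate_spiral_alphabet (size : Int) (out : String) : Prop := out = generate_spiral_alphabet_alt size
instance (size : Int) (out : String) : Decidable (Spec_generate_spiral_alphabet size out) := by unfold Spec_generate_spiral_alphabet; infer_instance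

-- ===== CLAIM (what is proved, stated in full; the proofs are below) =====
def Claim_equal_generate_spiral_alphabet : Prop := ∀ (size : Int), Dom_generate_spiral_alphabet size → Spec_generate_spiral_alphabet size (generate_spiral_alphabet size)

-- ===== LEMMAS AND PROOFS =====

-- the diagonal cell read A performs
def cellAt (g : List (List String)) (i j : Int) : String := (g.getD i.toNat []).getD j.toNat ""

-- the letter index the spiral leaves at diagonal offset d of a ring of side m whose
-- first cell carries letter position li
def pvE (m li d : Int) : Int :=
  if 1 ≤ m then
    if d = 0 then PySem.Int.mod li 26
    else if d = m - 1 then PySem.Int.mod (li + 2 * m - 2) 26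
    else pvE (m - 2) (li + 4 * m - 4) (d - 1)
  else 0
termination_by m.toNat
decreasing_by omega

def isSquare (g : List (List String)) (n : Nat) : Prop :=
  g.length = n ∧ ∀ row ∈ g, row.length = n

lemma mod26 (a : Int) : PySem.Int.mod a 26 = a % 26 :=
  PySem.Int.mod_eq_emod_of_pos (by norm_num)

lemma pvE_congr (m a b d : Int) (hab : a % 26 = b % 26) : pvE m a d = pvE m b d := by
  induction hm : m.toNat using Nat.strong_induction_on generalizing m a b d with
  | _ mN ih =>
    conv_lhs => rw [pvE]
    conv_rhs => rw [pvE]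
    split_ifs with h1 h2 h3
    · rw [mod26, mod26]; omega
    · rw [mod26, mod26]; omega
    · exact ih (m - 2).toNat (by omega) (m - 2) (a + 4 * m - 4) (b + 4 * m - 4) (d - 1)
        (by omega) rfl
    · rfl

lemma pvE_mod (m li d : Int) : pvE m (PySem.Int.mod li 26) d = pvE m li d :=
  pvE_congr m _ li d (by rw [mod26]; omega)

-- pvSetCell facts -------------------------------------------------------------

lemma square_setCell {g : List (List String)} {n : Nat} (h : isSquare g n)
    (r c : Int) (v : String) : isSquare (pvSetCell g r c v) n := by
  obtain ⟨hl, hr⟩ := h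
  by_cases hin : r.toNat < g.length
  · refine ⟨by simp [pvSetCell, hl], ?_⟩
    intro row hrow
    rcases List.mem_or_eq_of_mem_set hrow with hmem | heq
    · exact hr row hmem
    · subst heq
      rw [List.getD_eq_getElem _ _ hin, List.length_set]
      exact hr _ (List.getElem_mem hin)
  · unfold pvSetCell
    rw [List.set_eq_of_length_le (by omega)]
    exact ⟨hl, hr⟩

lemma cellAt_setCell_self {g : List (List String)} {n : Nat} (h : isSquare g n)
    {r c : Int} (hr : 0 ≤ r) (hc : 0 ≤ c) (hrn : r.toNat < n) (hcn : c.toNat < n)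
    (v : String) : cellAt (pvSetCell g r c v) r c = v := by
  obtain ⟨hl, hrows⟩ := h
  have hin : r.toNat < g.length := by omega
  have hrowlen : (g[r.toNat]?.getD []).length = n := by
    rw [List.getElem?_eq_getElem hin]; exact hrows _ (List.getElem_mem hin)
  unfold cellAt pvSetCell
  simp only [List.getD]
  rw [List.getElem?_set_self hin]
  simp only [Option.getD_some]
  rw [List.getElem?_set_self (by omega)]
  rfl

lemma cellAt_setCell_ne {g : List (List String)} {r c x y : Int}
    (hx : 0 ≤ x) (hy : 0 ≤ y) (hr : 0 ≤ r) (hc : 0 ≤ c)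
    (hne : x ≠ r ∨ y ≠ c) (v : String) :
    cellAt (pvSetCell g r c v) x y = cellAt g x y := by
  unfold cellAt pvSetCell
  simp only [List.getD]
  rcases hne with hne | hne
  · have : r.toNat ≠ x.toNat := by omega
    rw [List.getElem?_set_ne this]
  · by_cases hxr : x.toNat = r.toNat
    · have hyc : c.toNat ≠ y.toNat := by omega
      rw [hxr]
      by_cases hin : r.toNat < g.length
      · rw [List.getElem?_set_self hin]
        simp only [Option.getD_some]
        rw [List.getElem?_set_ne hyc, List.getElem?_eq_getElem hin]
      · rw [List.set_eq_of_length_le (by omega)]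
    · rw [List.getElem?_set_ne fun h => hxr h.symm]

-- generic facts about one of A's painting loops: the fold steps a (grid, letter_index)
-- pair, writing one cell and advancing letter_index mod 26 at each index of the range

lemma paint_snd (f : List (List String) → Int → Int → List (List String))
    (L : List Int) : ∀ (g : List (List String)) (li : Int), 0 ≤ li → li < 26 →
    ((L.foldl (fun s i => (f s.1 i s.2, PySem.Int.mod (s.2 + 1) 26)) (g, li)).2)
      = PySem.Int.mod (li + L.length) 26 := by
  induction L with
  | nil =>
    intro g li h0 h1
    simp only [List.foldl_nil, List.length_nil, Nat.cast_zero, add_zero, mod26]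
    omega
  | cons a L ih =>
    intro g li h0 h1
    simp only [List.foldl_cons]
    rw [ih _ _ (by rw [mod26]; omega) (by rw [mod26]; omega)]
    simp only [mod26, List.length_cons]
    push_cast
    omega

lemma paint_square (f : List (List String) → Int → Int → List (List String)) {n : Nat}
    (hf : ∀ g i li, isSquare g n → isSquare (f g i li) n)
    (L : List Int) : ∀ (g : List (List String)) (li : Int), isSquare g n →
    isSquare ((L.foldl (fun s i => (f s.1 i s.2, PySem.Int.mod (s.2 + 1) 26)) (g, li)).1) n := by
  induction L with
  | nil => intro g li hg; exact hg
  | cons a L ih =>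
    intro g li hg
    simp only [List.foldl_cons]
    exact ih _ _ (hf g a li hg)

lemma paint_preserve (f : List (List String) → Int → Int → List (List String)) {x y : Int}
    (L : List Int) : ∀ (g : List (List String)) (li : Int),
    (∀ g' li' i, i ∈ L → cellAt (f g' i li') x y = cellAt g' x y) →
    cellAt ((L.foldl (fun s i => (f s.1 i s.2, PySem.Int.mod (s.2 + 1) 26)) (g, li)).1) x y
      = cellAt g x y := by
  induction L with
  | nil => intro g li _; rfl
  | cons a L ih =>
    intro g li hpres
    simp only [List.foldl_cons]
    rw [ih _ _ (fun g' li' i hi => hpres g' li' i (List.mem_cons_of_mem a hi))]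
    exact hpres g li a List.mem_cons_self

lemma paint_hit (f : List (List String) → Int → Int → List (List String)) {n : Nat}
    {x y : Int} (L₁ L₂ : List Int) (t : Int) (g : List (List String)) (li : Int)
    (hsq : isSquare g n) (h0 : 0 ≤ li) (h1 : li < 26)
    (hfsq : ∀ g' i li', isSquare g' n → isSquare (f g' i li') n)
    (hhit : ∀ g' li', isSquare g' n → cellAt (f g' t li') x y = pvLetterA li')
    (hpres : ∀ g' li' i, i ∈ L₂ → cellAt (f g' i li') x y = cellAt g' x y) :
    cellAt (((L₁ ++ t :: L₂).foldl
        (fun s i => (f s.1 i s.2, PySem.Int.mod (s.2 + 1) 26)) (g, li)).1) x y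
      = pvLetterA (PySem.Int.mod (li + L₁.length) 26) := by
  rw [List.foldl_append]
  have hsq1 : isSquare ((L₁.foldl (fun s i => (f s.1 i s.2, PySem.Int.mod (s.2 + 1) 26)) (g, li)).1) n :=
    paint_square f hfsq L₁ g li hsq
  have hsnd := paint_snd f L₁ g li h0 h1
  set s1 := L₁.foldl (fun s i => (f s.1 i s.2, PySem.Int.mod (s.2 + 1) 26)) (g, li) with hs1
  simp only [List.foldl_cons]
  rw [paint_preserve f L₂ _ _ hpres]
  rw [hhit s1.1 s1.2 hsq1, hsnd]

-- specialisations to the two shapes A's four loops take: painting along a row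
-- (moving right/left) and along a column (moving down/up)

lemma rowPaint_snd (R : Int) (L : List Int) (g : List (List String)) (li : Int)
    (h0 : 0 ≤ li) (h1 : li < 26) :
    ((L.foldl (fun s i => (pvSetCell s.1 R i (pvLetterA s.2), PySem.Int.mod (s.2 + 1) 26)) (g, li)).2)
      = PySem.Int.mod (li + L.length) 26 :=
  paint_snd (fun g i li => pvSetCell g R i (pvLetterA li)) L g li h0 h1

lemma colPaint_snd (C : Int) (L : List Int) (g : List (List String)) (li : Int)
    (h0 : 0 ≤ li) (h1 : li < 26) :
    ((L.foldl (fun s i => (pvSetCell s.1 i C (pvLetterA s.2), PySem.Int.mod (s.2 + 1) 26)) (g, li)).2)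
      = PySem.Int.mod (li + L.length) 26 :=
  paint_snd (fun g i li => pvSetCell g i C (pvLetterA li)) L g li h0 h1

lemma rowPaint_square (R : Int) {n : Nat} (L : List Int) (g : List (List String)) (li : Int)
    (hg : isSquare g n) :
    isSquare ((L.foldl (fun s i => (pvSetCell s.1 R i (pvLetterA s.2), PySem.Int.mod (s.2 + 1) 26)) (g, li)).1) n :=
  paint_square (fun g i li => pvSetCell g R i (pvLetterA li))
    (fun g i li hsq => square_setCell hsq R i (pvLetterA li)) L g li hg

lemma colPaint_square (C : Int) {n : Nat} (L : List Int) (g : List (List String)) (li : Int)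
    (hg : isSquare g n) :
    isSquare ((L.foldl (fun s i => (pvSetCell s.1 i C (pvLetterA s.2), PySem.Int.mod (s.2 + 1) 26)) (g, li)).1) n :=
  paint_square (fun g i li => pvSetCell g i C (pvLetterA li))
    (fun g i li hsq => square_setCell hsq i C (pvLetterA li)) L g li hg

lemma rowPaint_preserve (R : Int) {x y : Int} (L : List Int) (g : List (List String)) (li : Int)
    (hx : 0 ≤ x) (hy : 0 ≤ y) (hR : 0 ≤ R) (hL : ∀ i ∈ L, 0 ≤ i)
    (hne : ∀ i ∈ L, ¬(R = x ∧ i = y)) :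
    cellAt ((L.foldl (fun s i => (pvSetCell s.1 R i (pvLetterA s.2), PySem.Int.mod (s.2 + 1) 26)) (g, li)).1) x y
      = cellAt g x y :=
  paint_preserve (fun g i li => pvSetCell g R i (pvLetterA li)) L g li
    (fun g' li' i hi => cellAt_setCell_ne hx hy hR (hL i hi)
      (by rcases not_and_or.mp (hne i hi) with h | h
          · exact Or.inl (fun hc => h hc.symm)
          · exact Or.inr (fun hc => h hc.symm)) _)

lemma colPaint_preserve (C : Int) {x y : Int} (L : List Int) (g : List (List String)) (li : Int)
    (hx : 0 ≤ x) (hy : 0 ≤ y) (hC : 0 ≤ C) (hL : ∀ i ∈ L, 0 ≤ i)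
    (hne : ∀ i ∈ L, ¬(i = x ∧ C = y)) :
    cellAt ((L.foldl (fun s i => (pvSetCell s.1 i C (pvLetterA s.2), PySem.Int.mod (s.2 + 1) 26)) (g, li)).1) x y
      = cellAt g x y :=
  paint_preserve (fun g i li => pvSetCell g i C (pvLetterA li)) L g li
    (fun g' li' i hi => cellAt_setCell_ne hx hy (hL i hi) hC
      (by rcases not_and_or.mp (hne i hi) with h | h
          · exact Or.inl (fun hc => h hc.symm)
          · exact Or.inr (fun hc => h hc.symm)) _)

lemma rowPaint_hit (R : Int) {n : Nat} (L₁ L₂ : List Int) (t : Int)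
    (g : List (List String)) (li : Int) (hsq : isSquare g n) (h0 : 0 ≤ li) (h1 : li < 26)
    (hR : 0 ≤ R) (ht : 0 ≤ t) (hRn : R.toNat < n) (htn : t.toNat < n)
    (hL₂0 : ∀ i ∈ L₂, 0 ≤ i) (hL₂ : ∀ i ∈ L₂, i ≠ t) :
    cellAt (((L₁ ++ t :: L₂).foldl
        (fun s i => (pvSetCell s.1 R i (pvLetterA s.2), PySem.Int.mod (s.2 + 1) 26)) (g, li)).1) R t
      = pvLetterA (PySem.Int.mod (li + L₁.length) 26) :=
  paint_hit (fun g i li => pvSetCell g R i (pvLetterA li)) L₁ L₂ t g li hsq h0 h1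
    (fun g i li hsq => square_setCell hsq R i (pvLetterA li))
    (fun g' li' hsq' => cellAt_setCell_self hsq' hR ht hRn htn _)
    (fun g' li' i hi => cellAt_setCell_ne hR ht hR (hL₂0 i hi)
      (Or.inr fun hc => hL₂ i hi hc.symm) _)

lemma colPaint_hit (C : Int) {n : Nat} (L₁ L₂ : List Int) (t : Int)
    (g : List (List String)) (li : Int) (hsq : isSquare g n) (h0 : 0 ≤ li) (h1 : li < 26)
    (hC : 0 ≤ C) (ht : 0 ≤ t) (hCn : C.toNat < n) (htn : t.toNat < n)
    (hL₂0 : ∀ i ∈ L₂, 0 ≤ i) (hL₂ : ∀ i ∈ L₂, i ≠ t) :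
    cellAt (((L₁ ++ t :: L₂).foldl
        (fun s i => (pvSetCell s.1 i C (pvLetterA s.2), PySem.Int.mod (s.2 + 1) 26)) (g, li)).1) t C
      = pvLetterA (PySem.Int.mod (li + L₁.length) 26) :=
  paint_hit (fun g i li => pvSetCell g i C (pvLetterA li)) L₁ L₂ t g li hsq h0 h1
    (fun g i li hsq => square_setCell hsq i C (pvLetterA li))
    (fun g' li' hsq' => cellAt_setCell_self hsq' ht hC htn hCn _)
    (fun g' li' i hi => cellAt_setCell_ne ht hC (hL₂0 i hi) hC
      (Or.inl fun hc => hL₂ i hi hc.symm) _)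

-- unfolding lemmas for A's while loop ------------------------------------------

lemma pvSpin_exit (top bottom left right d li : Int) (g : List (List String))
    (h : ¬(top ≤ bottom ∧ left ≤ right)) : pvSpin top bottom left right d li g = g := by
  rw [pvSpin, dif_neg h]

lemma pvSpin_dir0 (top bottom left right li : Int) (g : List (List String))
    (h : top ≤ bottom ∧ left ≤ right) :
    pvSpin top bottom left right 0 li g =
      pvSpin (top + 1) bottom left right 1
        ((PySem.List.pyRange left (right + 1) 1).foldl
          (fun s i => (pvSetCell s.1 top i (pvLetterA s.2), PySem.Int.mod (s.2 + 1) 26)) (g, li)).2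
        ((PySem.List.pyRange left (right + 1) 1).foldl
          (fun s i => (pvSetCell s.1 top i (pvLetterA s.2), PySem.Int.mod (s.2 + 1) 26)) (g, li)).1 := by
  rw [pvSpin, dif_pos h]; rfl

lemma pvSpin_dir1 (top bottom left right li : Int) (g : List (List String))
    (h : top ≤ bottom ∧ left ≤ right) :
    pvSpin top bottom left right 1 li g =
      pvSpin top bottom left (right - 1) 2
        ((PySem.List.pyRange top (bottom + 1) 1).foldl
          (fun s i => (pvSetCell s.1 i right (pvLetterA s.2), PySem.Int.mod (s.2 + 1) 26)) (g, li)).2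
        ((PySem.List.pyRange top (bottom + 1) 1).foldl
          (fun s i => (pvSetCell s.1 i right (pvLetterA s.2), PySem.Int.mod (s.2 + 1) 26)) (g, li)).1 := by
  rw [pvSpin, dif_pos h]; rfl

lemma pvSpin_dir2 (top bottom left right li : Int) (g : List (List String))
    (h : top ≤ bottom ∧ left ≤ right) :
    pvSpin top bottom left right 2 li g =
      pvSpin top (bottom - 1) left right 3
        ((PySem.List.pyRange right (left - 1) (-1)).foldl
          (fun s i => (pvSetCell s.1 bottom i (pvLetterA s.2), PySem.Int.mod (s.2 + 1) 26)) (g, li)).2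
        ((PySem.List.pyRange right (left - 1) (-1)).foldl
          (fun s i => (pvSetCell s.1 bottom i (pvLetterA s.2), PySem.Int.mod (s.2 + 1) 26)) (g, li)).1 := by
  rw [pvSpin, dif_pos h]; rfl

lemma pvSpin_dir3 (top bottom left right li : Int) (g : List (List String))
    (h : top ≤ bottom ∧ left ≤ right) :
    pvSpin top bottom left right 3 li g =
      pvSpin top bottom (left + 1) right 0
        ((PySem.List.pyRange bottom (top - 1) (-1)).foldl
          (fun s i => (pvSetCell s.1 i left (pvLetterA s.2), PySem.Int.mod (s.2 + 1) 26)) (g, li)).2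
        ((PySem.List.pyRange bottom (top - 1) (-1)).foldl
          (fun s i => (pvSetCell s.1 i left (pvLetterA s.2), PySem.Int.mod (s.2 + 1) 26)) (g, li)).1 := by
  rw [pvSpin, dif_pos h]; rfl

-- the heart of the proof: what the spiral leaves on the diagonal -----------------

lemma spin_diag (mN : Nat) : ∀ (n k li j : Int) (g : List (List String)),
    mN = (n - 2*k).toNat → isSquare g n.toNat → 0 ≤ k → 0 ≤ li → li < 26 → 0 ≤ j →
    cellAt (pvSpin k (n-1-k) k (n-1-k) 0 li g) j j
      = if k ≤ j ∧ j ≤ n-1-k then pvLetterA (pvE (n-2*k) li (j-k)) else cellAt g j j := by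
  induction mN using Nat.strong_induction_on with
  | _ mN ih =>
  intro n k li j g hm hsq hk h0 h1 hj
  by_cases hstop : n - 2*k ≤ 0
  · rw [pvSpin_exit _ _ _ _ _ _ _ (by omega), if_neg (by omega)]
  -- the top edge is painted in every case
  rw [pvSpin_dir0 _ _ _ _ _ _ (by omega)]
  set F1 := (PySem.List.pyRange k (n - 1 - k + 1) 1).foldl
      (fun s i => (pvSetCell s.1 k i (pvLetterA s.2), PySem.Int.mod (s.2 + 1) 26))
      (g, li) with hF1
  have hsq1 : isSquare F1.1 n.toNat := by rw [hF1]; exact rowPaint_square k _ g li hsq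
  have hl1 : F1.2 = PySem.Int.mod (li + (n - 2*k)) 26 := by
    rw [hF1, rowPaint_snd k _ g li h0 h1, PySem.List.length_pyRange_one, mod26, mod26]
    omega
  have h01 : 0 ≤ F1.2 := by rw [hl1, mod26]; omega
  have h11 : F1.2 < 26 := by rw [hl1, mod26]; omega
  have hsplit1 : PySem.List.pyRange k (n - 1 - k + 1) 1
      = [] ++ k :: PySem.List.pyRange (k+1) (n - 1 - k + 1) 1 := by
    rw [PySem.List.pyRange_one_cons (by omega)]; rfl
  have hck1 : cellAt F1.1 k k = pvLetterA li := by
    rw [hF1, hsplit1, rowPaint_hit k [] _ k g li hsq h0 h1 hk hk (by omega) (by omega)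
      (fun i hi => by have := PySem.List.mem_pyRange_one.mp hi; omega)
      (fun i hi => by have := PySem.List.mem_pyRange_one.mp hi; omega)]
    congr 1
    rw [mod26]
    simp
    omega
  have hpres_f1 : j ≠ k → cellAt F1.1 j j = cellAt g j j := by
    intro hne
    rw [hF1]
    exact rowPaint_preserve k _ g li hj hj hk
      (fun i hi => by have := PySem.List.mem_pyRange_one.mp hi; omega)
      (fun i hi => by intro hc; exact hne (hc.1.symm))
  by_cases hm1 : n - 2*k = 1
  · -- a single central cell: the loop exits after the first edge
    rw [pvSpin_exit _ _ _ _ _ _ _ (by omega)]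
    by_cases hjk : j = k
    · subst hjk
      rw [if_pos (by omega), show j - j = 0 by ring, pvE, if_pos (by omega), if_pos rfl,
        hck1]
      congr 1
      rw [mod26]
      omega
    · rw [if_neg (by omega)]
      exact hpres_f1 hjk
  · -- at least a 2×2 ring: right edge and bottom edge are painted too
    rw [pvSpin_dir1 _ _ _ _ _ _ (by omega)]
    set F2 := (PySem.List.pyRange (k+1) (n - 1 - k + 1) 1).foldl
        (fun s i => (pvSetCell s.1 i (n - 1 - k) (pvLetterA s.2), PySem.Int.mod (s.2 + 1) 26))
        (F1.1, F1.2) with hF2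
    have hsq2 : isSquare F2.1 n.toNat := by rw [hF2]; exact colPaint_square _ _ _ _ hsq1
    have hl2 : F2.2 = PySem.Int.mod (li + (2*(n - 2*k) - 1)) 26 := by
      rw [hF2, colPaint_snd _ _ _ _ h01 h11, hl1, PySem.List.length_pyRange_one]
      simp only [mod26]
      omega
    have h02 : 0 ≤ F2.2 := by rw [hl2, mod26]; omega
    have h12 : F2.2 < 26 := by rw [hl2, mod26]; omega
    have hsplit2 : PySem.List.pyRange (k+1) (n - 1 - k + 1) 1
        = PySem.List.pyRange (k+1) (n - 1 - k) 1 ++ (n - 1 - k) :: [] :=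
      PySem.List.pyRange_one_succ_right (by omega)
    have hcb2 : cellAt F2.1 (n - 1 - k) (n - 1 - k)
        = pvLetterA (PySem.Int.mod (li + (2*(n - 2*k) - 2)) 26) := by
      rw [hF2, hsplit2, colPaint_hit (n - 1 - k) _ [] (n - 1 - k) F1.1 F1.2 hsq1 h01 h11
        (by omega) (by omega) (by omega) (by omega)
        (fun i hi => absurd hi (List.not_mem_nil))
        (fun i hi => absurd hi (List.not_mem_nil))]
      congr 1
      rw [hl1, PySem.List.length_pyRange_one]
      simp only [mod26]
      omega
    have hpres_f2 : j ≠ n - 1 - k → cellAt F2.1 j j = cellAt F1.1 j j := by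
      intro hne
      rw [hF2]
      exact colPaint_preserve _ _ _ _ hj hj (by omega)
        (fun i hi => by have := PySem.List.mem_pyRange_one.mp hi; omega)
        (fun i hi => by intro hc; exact hne (hc.2.symm))
    rw [pvSpin_dir2 _ _ _ _ _ _ (by omega)]
    set F3 := (PySem.List.pyRange (n - 1 - k - 1) (k - 1) (-1)).foldl
        (fun s i => (pvSetCell s.1 (n - 1 - k) i (pvLetterA s.2), PySem.Int.mod (s.2 + 1) 26))
        (F2.1, F2.2) with hF3
    have hsq3 : isSquare F3.1 n.toNat := by rw [hF3]; exact rowPaint_square _ _ _ _ hsq2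
    have hl3 : F3.2 = PySem.Int.mod (li + (3*(n - 2*k) - 2)) 26 := by
      rw [hF3, rowPaint_snd _ _ _ _ h02 h12, hl2, PySem.List.length_pyRange_neg_one]
      simp only [mod26]
      omega
    have h03 : 0 ≤ F3.2 := by rw [hl3, mod26]; omega
    have h13 : F3.2 < 26 := by rw [hl3, mod26]; omega
    have hpres_f3 : cellAt F3.1 j j = cellAt F2.1 j j := by
      rw [hF3]
      exact rowPaint_preserve _ _ _ _ hj hj (by omega)
        (fun i hi => by have := PySem.List.mem_pyRange_neg_one.mp hi; omega)
        (fun i hi => by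
          have := PySem.List.mem_pyRange_neg_one.mp hi
          intro hc
          omega)
    by_cases hm2e : n - 2*k = 2
    · -- 2×2 ring: the loop exits before the left edge
      rw [pvSpin_exit _ _ _ _ _ _ _ (by omega)]
      by_cases hjk : j = k
      · subst hjk
        rw [if_pos (by omega), show j - j = 0 by ring, pvE, if_pos (by omega), if_pos rfl,
          hpres_f3, hpres_f2 (by omega), hck1]
        congr 1
        rw [mod26]
        omega
      · by_cases hjb : j = n - 1 - k
        · rw [if_pos (by omega), pvE, if_pos (by omega), if_neg (by omega),
            if_pos (by omega), hpres_f3, hjb, hcb2]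
          congr 1
          simp only [mod26]
          omega
        · rw [if_neg (by omega), hpres_f3, hpres_f2 hjb, hpres_f1 hjk]
    · -- a ring of side ≥ 3: left edge painted, then recurse on the inner square
      rw [pvSpin_dir3 _ _ _ _ _ _ (by omega)]
      set F4 := (PySem.List.pyRange (n - 1 - k - 1) (k + 1 - 1) (-1)).foldl
          (fun s i => (pvSetCell s.1 i k (pvLetterA s.2), PySem.Int.mod (s.2 + 1) 26))
          (F3.1, F3.2) with hF4
      have hsq4 : isSquare F4.1 n.toNat := by rw [hF4]; exact colPaint_square _ _ _ _ hsq3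
      have hl4 : F4.2 = PySem.Int.mod (li + 4*(n - 2*k) - 4) 26 := by
        rw [hF4, colPaint_snd _ _ _ _ h03 h13, hl3, PySem.List.length_pyRange_neg_one]
        simp only [mod26]
        omega
      have h04 : 0 ≤ F4.2 := by rw [hl4, mod26]; omega
      have h14 : F4.2 < 26 := by rw [hl4, mod26]; omega
      have hpres_f4 : cellAt F4.1 j j = cellAt F3.1 j j := by
        rw [hF4]
        exact colPaint_preserve _ _ _ _ hj hj hk
          (fun i hi => by have := PySem.List.mem_pyRange_neg_one.mp hi; omega)
          (fun i hi => by
            have := PySem.List.mem_pyRange_neg_one.mp hi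
            intro hc
            omega)
      have hrw : n - 1 - k - 1 = n - 1 - (k+1) := by ring
      rw [hrw]
      rw [ih (n - 2*(k+1)).toNat (by omega) n (k+1) F4.2 j F4.1 rfl hsq4 (by omega)
        h04 h14 hj]
      by_cases hin : k + 1 ≤ j ∧ j ≤ n - 1 - (k+1)
      · rw [if_pos hin, if_pos (by omega), hl4]
        conv_rhs => rw [pvE, if_pos (by omega : (1:Int) ≤ n - 2*k),
          if_neg (by omega : ¬(j - k = 0)), if_neg (by omega : ¬(j - k = n - 2*k - 1))]
        rw [pvE_mod]
        rw [show n - 2*(k+1) = n - 2*k - 2 by ring, show j - (k+1) = j - k - 1 by ring]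
      · rw [if_neg hin, hpres_f4, hpres_f3]
        by_cases hjk : j = k
        · subst hjk
          rw [if_pos (by omega), show j - j = 0 by ring, pvE, if_pos (by omega),
            if_pos rfl, hpres_f2 (by omega), hck1]
          congr 1
          rw [mod26]
          omega
        · by_cases hjb : j = n - 1 - k
          · rw [if_pos (by omega), pvE, if_pos (by omega), if_neg (by omega),
              if_pos (by omega), hjb, hcb2]
            congr 1
            simp only [mod26]
            omega
          · rw [if_neg (by omega), hpres_f2 hjb, hpres_f1 hjk]

-- B side: flattening the accumulator recursion ----------------------------------

lemma rings_flatten (mN : Nat) : ∀ (m pos : Int) (front back : List String), mN = m.toNat →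
    (pvRings m pos front back).1 ++ ((pvRings m pos front back).2).reverse
      = front ++ ((PySem.List.pyRange 0 m 1).map (fun d => pvLetterB (pvE m pos d)))
          ++ back.reverse := by
  induction mN using Nat.strong_induction_on with
  | _ mN ih =>
    intro m pos front back hm
    by_cases h1 : 1 ≤ m
    · rw [pvRings, if_pos h1]
      rw [ih (m - 2).toNat (by omega) (m - 2) (pos + 4 * m - 4) _ _ rfl]
      have hE0 : pvE m pos 0 = PySem.Int.mod pos 26 := by
        rw [pvE, if_pos h1, if_pos rfl]
      by_cases h2 : 1 < m
      · have hElast : pvE m pos (m - 1) = PySem.Int.mod (pos + 2 * m - 2) 26 := by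
          rw [pvE, if_pos h1, if_neg (by omega), if_pos rfl]
        have hsplit : PySem.List.pyRange 0 m 1
            = 0 :: (PySem.List.pyRange 1 (m - 1) 1 ++ [m - 1]) := by
          rw [PySem.List.pyRange_one_cons (by omega)]
          congr 1
          have h := PySem.List.pyRange_one_succ_right (show (1:Int) ≤ m - 1 by omega)
          rw [show m - 1 + 1 = m by ring] at h
          exact h
        have hmid : (PySem.List.pyRange 1 (m - 1) 1).map (fun d => pvLetterB (pvE m pos d))
            = (PySem.List.pyRange 0 (m - 2) 1).map
                (fun d => pvLetterB (pvE (m - 2) (pos + 4 * m - 4) d)) := by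
          rw [PySem.List.pyRange_one 1 (m - 1), PySem.List.pyRange_one 0 (m - 2)]
          rw [show (m - 1 - 1).toNat = (m - 2 - 0).toNat by omega]
          simp only [List.map_map]
          apply List.map_congr_left
          intro t htmem
          simp only [Function.comp_apply]
          have htl : (t : Int) < m - 2 := by
            have := List.mem_range.mp htmem; omega
          have : pvE m pos (1 + (t : Int)) = pvE (m - 2) (pos + 4 * m - 4) (1 + (t : Int) - 1) := by
            rw [pvE, if_pos h1, if_neg (by omega), if_neg (by omega)]
          rw [this, show (1 : Int) + (t : Int) - 1 = 0 + (t : Int) by ring]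
        rw [if_pos h2, hsplit]
        simp only [List.map_cons, List.map_append, List.map_cons, List.map_nil,
          List.reverse_append, List.reverse_cons, List.reverse_nil, hE0, hElast, hmid]
        simp [List.append_assoc]
      · have hm1 : m = 1 := by omega
        rw [if_neg h2]
        subst hm1
        have hnil : PySem.List.pyRange 0 (1 - 2 : Int) 1 = [] :=
          PySem.List.pyRange_one_eq_nil (by omega)
        have hone : PySem.List.pyRange 0 (1 : Int) 1 = [0] := by
          have := PySem.List.pyRange_one_singleton (0 : Int)
          simpa using this
        rw [hnil, hone]
        simp [hE0]
    · rw [pvRings, if_neg h1]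
      rw [PySem.List.pyRange_one_eq_nil (by omega)]
      simp

-- joining with the empty separator ----------------------------------------------

lemma chars_join_nil (l : List (List Char)) : PySem.Chars.join [] l = l.flatten := by
  induction l with
  | nil => simp [PySem.Chars.join_nil]
  | cons a tail ih =>
    cases tail with
    | nil => simp [PySem.Chars.join_singleton]
    | cons b rest => rw [PySem.Chars.join_cons_cons] at *; simp_all

lemma letterAB : pvLetterB = pvLetterA := rfl

-- ===== VERDICT (by name: the statement is the Claim_ definition above) =====
theorem generate_spiral_alphabet_spec : Claim_equal_generate_spiral_alphabet := by
  intro size _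
  unfold Spec_generate_spiral_alphabet
  simp only [generate_spiral_alphabet, generate_spiral_alphabet_alt]
  have hsq : isSquare (List.replicate size.toNat (List.replicate size.toNat "")) size.toNat := by
    refine ⟨by simp, ?_⟩
    intro row hrow
    rw [List.eq_of_mem_replicate hrow]
    simp
  have hdiag : ∀ i ∈ PySem.List.pyRange 0 size 1,
      cellAt (pvSpin 0 (size-1) 0 (size-1) 0 0
          (List.replicate size.toNat (List.replicate size.toNat ""))) i i
        = pvLetterA (pvE size 0 i) := by
    intro i hi
    have hmem := PySem.List.mem_pyRange_one.mp hi
    have h := spin_diag (size - 2*0).toNat size 0 0 i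
      (List.replicate size.toNat (List.replicate size.toNat "")) rfl hsq le_rfl le_rfl
      (by norm_num) hmem.1
    rw [if_pos (by omega)] at h
    rw [show size - 1 - 0 = size - 1 by ring, show size - 2*0 = size by ring,
      show i - 0 = i by ring] at h
    exact h
  have hmap : (PySem.List.pyRange 0 size 1).map
        (fun i => ((pvSpin 0 (size-1) 0 (size-1) 0 0
          (List.replicate size.toNat (List.replicate size.toNat ""))).getD i.toNat []).getD i.toNat "")
      = (PySem.List.pyRange 0 size 1).map (fun i => pvLetterA (pvE size 0 i)) :=
    List.map_congr_left (fun i hi => hdiag i hi)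
  have hB := rings_flatten size.toNat size 0 [] [] rfl
  simp only [List.nil_append, List.append_nil, List.reverse_nil] at hB
  rw [hmap]
  refine String.toList_inj.mp ?_
  rw [String.toList_append]
  simp only [PySem.Str.toList_join]
  rw [show ("" : String).toList = [] from rfl]
  rw [chars_join_nil, chars_join_nil, chars_join_nil]
  rw [← List.flatten_append, ← List.map_append, hB, letterAB]
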